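-- pv_equiv track=rewrite | github.com/PRKKILLER/Algorithm_Practice | Company-OA/Amazon/Unhappy supplier.py | solution
-- ===== SOURCE A (Python) =====
-- def solution(oldID):
--     n = len(oldID)
--     if n < 2: return 'IMPOSSIBLE'
--
--     mid = n // 2
--     oldID = list(oldID)
--
--     for i in range(mid):
--         if oldID[i] != 'a':
--             oldID[i] = 'a'
--             return ''.join(oldID)
--
--     return 'IMPOSSIBLE'
-- ===== SOURCE B (Python) =====
-- def solution(oldID):
--     # Divide and conquer: first_non_a(lo, hi) finds the first index in [lo, hi)
--     # holding a non-'a' character by splitting the interval, preferring the left half.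
--     def first_non_a(lo, hi):
--         if hi - lo == 0:
--             return None
--         if hi - lo == 1:
--             return lo if oldID[lo] != 'a' else None
--         mid = (lo + hi) // 2
--         r = first_non_a(lo, mid)
--         return r if r is not None else first_non_a(mid, hi)
--     idx = first_non_a(0, len(oldID) // 2)
--     if idx is None:
--         return 'IMPOSSIBLE'
--     return oldID[:idx] + 'a' + oldID[idx + 1:]
-- ===== Notes on version B (the rewrite author's own statement) =====
-- stated objective: alternative
-- what changed: Replaces A's left-to-right index loop with in-place list mutation and join by a divide-and-conquer search over the index interval (split in half, prefer the left result) followed by slice reconstruction; n<2 is subsumed by the empty interval.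
import Mathlib
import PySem

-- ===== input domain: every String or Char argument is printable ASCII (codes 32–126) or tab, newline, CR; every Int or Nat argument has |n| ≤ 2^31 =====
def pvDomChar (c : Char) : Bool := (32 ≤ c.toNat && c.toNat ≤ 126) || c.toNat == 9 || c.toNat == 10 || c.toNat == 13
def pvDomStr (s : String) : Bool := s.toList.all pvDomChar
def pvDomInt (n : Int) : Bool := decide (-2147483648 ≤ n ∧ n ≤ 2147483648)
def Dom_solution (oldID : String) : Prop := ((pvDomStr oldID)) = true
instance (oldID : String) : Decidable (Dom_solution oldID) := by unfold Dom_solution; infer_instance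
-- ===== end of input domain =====

-- B replaces A's index loop with in-place mutation by a divide-and-conquer interval search plus slice reconstruction (alternative decomposition; same cost).

-- ===== PORT A =====
-- the 'for i in range(mid)' loop with its early return; i stays in range, so getD's default is never used
def solutionLoop (l : List Char) (mid i : Nat) : String :=
  if _h : i < mid then
    if l.getD i ' ' ≠ 'a' then String.mk (l.set i 'a')
    else solutionLoop l mid (i + 1)
  else "IMPOSSIBLE"
termination_by mid - i

def solution (oldID : String) : String :=
  let n := oldID.toList.length
  if n < 2 then "IMPOSSIBLE"
  else solutionLoop oldID.toList (n / 2) 0    -- n ≥ 0, so Nat '/' = Python '//'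

-- ===== PORT B =====
-- first_non_a(lo, hi): split [lo, hi) at its midpoint, prefer the left half's answer;
-- oldID[lo] is only read with lo < hi ≤ len(oldID), in range, so getD's default is never used
def firstNonA (l : List Char) (lo hi : Nat) : Option Nat :=
  if hi - lo = 0 then none
  else if hi - lo = 1 then (if l.getD lo ' ' ≠ 'a' then some lo else none)
  else
    match firstNonA l lo ((lo + hi) / 2) with   -- mid = (lo + hi) // 2
    | some r => some r
    | none => firstNonA l ((lo + hi) / 2) hi
termination_by hi - lo
decreasing_by all_goals omega

-- slices with nonnegative in-range bounds = take/drop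
def solution_alt (oldID : String) : String :=
  match firstNonA oldID.toList 0 (oldID.toList.length / 2) with
  | none => "IMPOSSIBLE"
  | some idx => String.mk (oldID.toList.take idx ++ 'a' :: oldID.toList.drop (idx + 1))

-- ===== PRECONDITION & SPEC =====
def Spec_solution (oldID : String) (out : String) : Prop := out = solution_alt oldID
instance (oldID : String) (out : String) : Decidable (Spec_solution oldID out) := by unfold Spec_solution; infer_instance

-- ===== CLAIM (what is proved, stated in full; the proofs are below) =====
def Claim_equal_solution : Prop := ∀ (oldID : String), Dom_solution oldID → Spec_solution oldID (solution oldID)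

-- ===== LEMMAS AND PROOFS =====

-- the shared characterisation: first index in [lo, hi) whose character is not 'a'
def pvFind (l : List Char) (lo len : Nat) : Option Nat :=
  (List.range' lo len).find? (fun i => decide (l.getD i ' ' ≠ 'a'))

lemma loop_eq_find (l : List Char) (mid : Nat) :
    ∀ k i, mid - i = k →
    solutionLoop l mid i =
      (match pvFind l i (mid - i) with
       | none => "IMPOSSIBLE"
       | some j => String.mk (l.set j 'a')) := by
  intro k
  induction k with
  | zero =>
    intro i hk
    rw [solutionLoop, hk]
    have : ¬ i < mid := by omega
    simp [this, pvFind]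
  | succ k ih =>
    intro i hk
    have hlt : i < mid := by omega
    rw [solutionLoop, dif_pos hlt, hk]
    have hr : List.range' i (k + 1) = i :: List.range' (i + 1) k := by
      simp [List.range'_succ]
    by_cases hc : l.getD i ' ' = 'a'
    · rw [if_neg (not_not_intro hc), ih (i + 1) (by omega)]
      have hk1 : mid - (i + 1) = k := by omega
      rw [hk1]
      unfold pvFind
      rw [hr, List.find?_cons_of_neg (by simpa [List.getD] using hc)]
    · rw [if_pos hc]
      unfold pvFind
      rw [hr, List.find?_cons_of_pos (by simpa [List.getD] using hc)]
  
lemma fna_eq_find (l : List Char) :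
    ∀ k lo hi, hi - lo ≤ k →
    firstNonA l lo hi = pvFind l lo (hi - lo) := by
  intro k
  induction k with
  | zero =>
    intro lo hi h
    have h0 : hi - lo = 0 := by omega
    rw [firstNonA, if_pos h0, h0]
    simp [pvFind]
  | succ k ih =>
    intro lo hi h
    rw [firstNonA]
    by_cases h0 : hi - lo = 0
    · rw [if_pos h0, h0]; simp [pvFind]
    · rw [if_neg h0]
      by_cases h1 : hi - lo = 1
      · rw [if_pos h1, h1]
        unfold pvFind
        simp only [List.range'_one, List.find?_singleton]
        by_cases hc : l.getD lo ' ' = 'a' <;> simp [hc]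
      · rw [if_neg h1]
        have hmid1 : (lo + hi) / 2 - lo ≤ k := by omega
        have hmid2 : hi - (lo + hi) / 2 ≤ k := by omega
        rw [ih lo ((lo + hi) / 2) hmid1, ih ((lo + hi) / 2) hi hmid2]
        unfold pvFind
        have hsplit : List.range' lo (hi - lo) =
            List.range' lo ((lo + hi) / 2 - lo) ++
            List.range' ((lo + hi) / 2) (hi - (lo + hi) / 2) := by
          have h := @List.range'_append lo ((lo + hi) / 2 - lo) (hi - (lo + hi) / 2) 1
          have e1 : lo + 1 * ((lo + hi) / 2 - lo) = (lo + hi) / 2 := by omega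
          have e2 : (lo + hi) / 2 - lo + (hi - (lo + hi) / 2) = hi - lo := by omega
          rw [e1, e2] at h
          exact h.symm
        rw [hsplit, List.find?_append]
        cases (List.range' lo ((lo + hi) / 2 - lo)).find?
            (fun i => decide (l.getD i ' ' ≠ 'a')) <;> simp

-- ===== VERDICT (by name: the statement is the Claim_ definition above) =====
theorem solution_spec : Claim_equal_solution := by
  unfold Claim_equal_solution Spec_solution
  intro s _
  unfold solution solution_alt
  set l := s.toList with hl
  set mid := l.length / 2 with hm
  have hB : firstNonA l 0 mid = pvFind l 0 mid := by
    simpa using fna_eq_find l mid 0 mid (by omega)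
  by_cases h2 : l.length < 2
  · have h0 : mid = 0 := by omega
    rw [h0, firstNonA]
    simp [h2]
  · rw [if_neg h2, hB, loop_eq_find l mid mid 0 (by omega)]
    simp only [Nat.sub_zero]
    cases hf : pvFind l 0 mid with
    | none => simp
    | some j =>
      have hjm : j ∈ List.range' 0 mid := List.mem_of_find?_eq_some hf
      have hj : j < l.length := by
        have := List.mem_range'_1.mp hjm
        omega
      simp only
      rw [List.set_eq_take_append_cons_drop, if_pos hj]
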